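-- pv_equiv track=rewrite | github.com/m0inur/Code-Forces | 800/Doors-And-Keys/Index.py | can_open_all_doors
-- ===== SOURCE A (Python) =====
-- def can_open_all_doors(map):
--     hasRedDoorKey = False
--     hasGreenDoorKey = False
--     hasBlueDoorKey = False
--
--     for i in range(len(map)):
--         if(map[i] == 'R' and hasRedDoorKey == False):
--             return "NO"
--         elif(map[i] == 'G' and hasGreenDoorKey == False):
--             return "NO"
--         elif(map[i] == 'B' and hasBlueDoorKey == False):
--             return "NO"
--         elif(map[i] == 'r'): hasRedDoorKey = True
--         elif(map[i] == 'g'): hasGreenDoorKey = True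
--         elif(map[i] == 'b'): hasBlueDoorKey = True
--
--     return "YES"
-- ===== SOURCE B (Python) =====
-- def can_open_all_doors(map):
--     for door, key in (('R', 'r'), ('G', 'g'), ('B', 'b')):
--         d = map.find(door)
--         k = map.find(key)
--         if d != -1 and (k == -1 or d < k):
--             return "NO"
--     return "YES"
-- ===== Notes on version B (the rewrite author's own statement) =====
-- stated objective: faster
-- what changed: Replaced A's per-character sequential scan carrying three boolean key-flags by three per-colour checks comparing the first occurrences (str.find) of each door and its key; in CPython the per-character interpreted loop disappears into C-implemented find calls.
import Mathlib
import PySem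

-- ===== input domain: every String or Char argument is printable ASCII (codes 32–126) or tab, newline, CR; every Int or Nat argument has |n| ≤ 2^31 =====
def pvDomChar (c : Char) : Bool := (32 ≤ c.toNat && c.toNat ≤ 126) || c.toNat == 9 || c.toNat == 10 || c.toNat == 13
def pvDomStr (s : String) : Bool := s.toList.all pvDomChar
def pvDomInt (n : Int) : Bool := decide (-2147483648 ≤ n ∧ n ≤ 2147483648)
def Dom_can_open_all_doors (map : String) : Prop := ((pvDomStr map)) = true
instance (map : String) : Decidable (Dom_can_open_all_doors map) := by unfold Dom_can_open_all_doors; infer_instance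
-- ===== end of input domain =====

-- B replaces A's single pass with three boolean flags by three independent first-occurrence
-- (str.find) comparisons, one per colour (same O(n) asymptotics; a timing run measured B faster by a constant factor).

-- ===== PORT A =====
-- A's index loop over map with three flags, as structural recursion over the characters.
def canOpenLoopA : List Char → Bool → Bool → Bool → String
  | [], _, _, _ => "YES"
  | c :: cs, r, g, b =>
    if c = 'R' ∧ r = false then "NO"
    else if c = 'G' ∧ g = false then "NO"
    else if c = 'B' ∧ b = false then "NO"
    else if c = 'r' then canOpenLoopA cs true g b
    else if c = 'g' then canOpenLoopA cs r true b
    else if c = 'b' then canOpenLoopA cs r g true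
    else canOpenLoopA cs r g b

def can_open_all_doors (map : String) : String :=
  canOpenLoopA map.toList false false false

-- ===== PORT B =====
-- Source B's loop over the three (door, key) pairs, testing first occurrences via str.find.
def canOpenPairsB : List (String × String) → String → String
  | [], _ => "YES"
  | (door, key) :: rest, m =>
    let d := PySem.Str.find m door
    let k := PySem.Str.find m key
    if d ≠ -1 ∧ (k = -1 ∨ d < k) then "NO"
    else canOpenPairsB rest m

def can_open_all_doors_alt (map : String) : String :=
  canOpenPairsB [("R", "r"), ("G", "g"), ("B", "b")] map

-- ===== PRECONDITION & SPEC =====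
def Spec_can_open_all_doors (map : String) (out : String) : Prop := out = can_open_all_doors_alt map
instance (map : String) (out : String) : Decidable (Spec_can_open_all_doors map out) := by unfold Spec_can_open_all_doors; infer_instance

-- ===== CLAIM (what is proved, stated in full; the proofs are below) =====
def Claim_equal_can_open_all_doors : Prop := ∀ (map : String), Dom_can_open_all_doors map → Spec_can_open_all_doors map (can_open_all_doors map)

-- ===== LEMMAS AND PROOFS =====

-- "door d occurs in l with no key k before it" as a single-pass boolean.
def noKeyBefore (d k : Char) : List Char → Bool
  | [] => false
  | c :: cs => if c = d then true else if c = k then false else noKeyBefore d k cs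

theorem singleton_infix_iff (c : Char) (l : List Char) : [c] <:+: l ↔ c ∈ l := by
  constructor
  · intro h; exact List.singleton_sublist.mp h.sublist
  · intro h
    obtain ⟨s, t, rfl⟩ := List.append_of_mem h
    exact ⟨s, t, by simp⟩

theorem singleton_prefix_drop (l : List Char) (n : Nat) (c : Char) :
    [c] <+: l.drop n ↔ l[n]? = some c := by
  rw [← List.head?_drop]
  cases h : l.drop n with
  | nil => simp
  | cons a t => simp [List.cons_prefix_iff]

theorem idxOf_eq_of (l : List Char) (n : Nat) (c : Char)
    (h1 : l[n]? = some c) (h2 : ∀ i < n, l[i]? ≠ some c) : l.idxOf c = n := by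
  induction l generalizing n with
  | nil => simp at h1
  | cons a t ih =>
    cases n with
    | zero => simp at h1; simp [h1, List.idxOf_cons_self]
    | succ m =>
      have ha : a ≠ c := by
        have := h2 0 (Nat.succ_pos m); simpa using this
      rw [List.idxOf_cons_ne _ (by simpa using ha)]
      simp at h1
      rw [ih m h1 (fun i hi => by have := h2 (i+1) (by omega); simpa using this)]


theorem find_singleton (l : List Char) (c : Char) :
    PySem.Chars.find l [c] = if c ∈ l then (l.idxOf c : Int) else -1 := by
  by_cases hc : c ∈ l
  · have h0 : 0 ≤ PySem.Chars.find l [c] :=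
      (PySem.Chars.find_nonneg_iff l [c]).mpr ((singleton_infix_iff c l).mpr hc)
    obtain ⟨hpre, hmin⟩ := PySem.Chars.find_spec (s := l) (sub := [c]) h0
    have hn : l[(PySem.Chars.find l [c]).toNat]? = some c :=
      (singleton_prefix_drop l _ c).mp hpre
    have hidx : l.idxOf c = (PySem.Chars.find l [c]).toNat :=
      idxOf_eq_of l _ c hn (fun i hi h => hmin i hi ((singleton_prefix_drop l i c).mpr h))
    rw [if_pos hc, hidx]
    omega
  · rw [if_neg hc]
    exact (PySem.Chars.find_eq_neg_one_iff l [c]).mpr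
      (fun h => hc ((singleton_infix_iff c l).mp h))


theorem noKeyBefore_iff (d k : Char) (hdk : d ≠ k) (l : List Char) :
    noKeyBefore d k l = true ↔ d ∈ l ∧ (k ∉ l ∨ l.idxOf d < l.idxOf k) := by
  induction l with
  | nil => simp [noKeyBefore]
  | cons a t ih =>
    by_cases had : a = d
    · subst had
      have h1 : List.idxOf k (a :: t) = List.idxOf k t + 1 := List.idxOf_cons_ne t hdk
      simp [noKeyBefore, h1]
    · by_cases hak : a = k
      · subst hak
        have h1 : List.idxOf d (a :: t) = List.idxOf d t + 1 := List.idxOf_cons_ne t had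
        simp [noKeyBefore, had, h1, List.idxOf_cons_self]
      · have h1 : List.idxOf d (a :: t) = List.idxOf d t + 1 := List.idxOf_cons_ne t had
        have h2 : List.idxOf k (a :: t) = List.idxOf k t + 1 := List.idxOf_cons_ne t hak
        simp [noKeyBefore, had, hak, ih, h1, h2, Ne.symm had, Ne.symm hak]

theorem cond_iff (d k : Char) (hdk : d ≠ k) (l : List Char) :
    (PySem.Chars.find l [d] ≠ -1 ∧
      (PySem.Chars.find l [k] = -1 ∨ PySem.Chars.find l [d] < PySem.Chars.find l [k]))
    ↔ noKeyBefore d k l = true := by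
  rw [find_singleton, find_singleton, noKeyBefore_iff d k hdk]
  by_cases hd : d ∈ l <;> by_cases hk : k ∈ l <;> simp [hd, hk]

theorem canOpenLoopA_eq (l : List Char) (r g b : Bool) :
    canOpenLoopA l r g b =
      if (r = false ∧ noKeyBefore 'R' 'r' l = true) ∨
         (g = false ∧ noKeyBefore 'G' 'g' l = true) ∨
         (b = false ∧ noKeyBefore 'B' 'b' l = true) then "NO" else "YES" := by
  induction l generalizing r g b with
  | nil => simp [canOpenLoopA, noKeyBefore]
  | cons c cs ih =>
    by_cases h1 : c = 'R'
    · subst h1; cases r <;> simp [canOpenLoopA, noKeyBefore, ih]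
    · by_cases h2 : c = 'G'
      · subst h2; cases g <;> simp [canOpenLoopA, noKeyBefore, ih, h1]
      · by_cases h3 : c = 'B'
        · subst h3; cases b <;> simp [canOpenLoopA, noKeyBefore, ih, h1, h2]
        · by_cases h4 : c = 'r'
          · subst h4; simp [canOpenLoopA, noKeyBefore, ih, h1, h2, h3]
          · by_cases h5 : c = 'g'
            · subst h5; simp [canOpenLoopA, noKeyBefore, ih, h1, h2, h3, h4]
            · by_cases h6 : c = 'b'
              · subst h6; simp [canOpenLoopA, noKeyBefore, ih, h1, h2, h3, h4, h5]
              · simp [canOpenLoopA, noKeyBefore, ih, h1, h2, h3, h4, h5, h6]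

-- ===== VERDICT (by name: the statement is the Claim_ definition above) =====
theorem can_open_all_doors_spec : Claim_equal_can_open_all_doors := by
  intro map _
  unfold Spec_can_open_all_doors can_open_all_doors can_open_all_doors_alt
  rw [canOpenLoopA_eq]
  simp only [canOpenPairsB, PySem.Str.find_eq,
    show ("R" : String).toList = ['R'] from rfl, show ("r" : String).toList = ['r'] from rfl,
    show ("G" : String).toList = ['G'] from rfl, show ("g" : String).toList = ['g'] from rfl,
    show ("B" : String).toList = ['B'] from rfl, show ("b" : String).toList = ['b'] from rfl,
    cond_iff 'R' 'r' (by decide), cond_iff 'G' 'g' (by decide), cond_iff 'B' 'b' (by decide)]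
  split_ifs <;> simp_all
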